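-- pv_equiv track=rewrite | github.com/aniket-agarwal1999/BreakFast_action | read_datasetBreakfast.py | get_label_bounds
-- ===== SOURCE A (Python) =====
-- def get_label_bounds( data_labels):
--     labels_uniq = []
--     labels_uniq_loc = []
--     for kki in range(0, len(data_labels) ):
--         uniq_group, indc_group = get_label_length_seq(data_labels[kki])
--         labels_uniq.append(uniq_group)
--         labels_uniq_loc.append(indc_group)
--     return labels_uniq, labels_uniq_loc
--
-- def get_label_length_seq(content):
--     label_seq = []
--     length_seq = []
--     start = 0
--     length_seq.append(0)
--     for i in range(len(content)):
--         if content[i] != content[start]: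
--             label_seq.append(content[start])
--             length_seq.append(i)
--             start = i
--     label_seq.append(content[start])
--     length_seq.append(len(content))
--
--     return label_seq, length_seq
-- ===== SOURCE B (Python) =====
-- def get_label_length_seq(content):
--     # Run-length encode with two pointers, then derive labels and prefix-sum bounds.
--     n = len(content)
--     runs = []
--     i = 0
--     while i < n:
--         j = i + 1
--         while j < n and content[j] == content[i]:
--             j += 1
--         runs.append((content[i], j - i))
--         i = j
--     labels = [v for v, _ in runs]
--     bounds = [0]
--     for _, c in runs:
--         bounds.append(bounds[-1] + c)
--     return labels, bounds
--
-- def get_label_bounds(data_labels):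
--     pairs = [get_label_length_seq(c) for c in data_labels]
--     return [p[0] for p in pairs], [p[1] for p in pairs]
-- ===== Notes on version B (the rewrite author's own statement) =====
-- stated objective: alternative
-- what changed: The helper now run-length encodes each sequence with a two-pointer inner skip loop into an intermediate (value, count) list and then derives the label list as the run values and the bound list as prefix sums of the run counts, instead of A's per-index scan comparing every element against the stored run start and appending to both outputs in place; the wrapper becomes a per-sequence comprehension plus two projections instead of a dual-accumulator loop.
import Mathlib
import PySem

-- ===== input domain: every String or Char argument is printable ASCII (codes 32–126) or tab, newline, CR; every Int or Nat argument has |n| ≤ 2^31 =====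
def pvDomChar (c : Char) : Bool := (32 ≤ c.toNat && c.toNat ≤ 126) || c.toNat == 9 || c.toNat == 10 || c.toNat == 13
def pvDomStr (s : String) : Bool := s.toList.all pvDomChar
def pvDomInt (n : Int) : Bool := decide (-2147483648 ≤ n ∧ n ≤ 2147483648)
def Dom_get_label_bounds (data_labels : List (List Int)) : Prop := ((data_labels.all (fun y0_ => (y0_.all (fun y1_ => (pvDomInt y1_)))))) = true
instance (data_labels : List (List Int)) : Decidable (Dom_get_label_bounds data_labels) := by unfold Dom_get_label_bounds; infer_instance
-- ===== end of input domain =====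

-- B's helper run-length encodes each sequence with a two-pointer inner skip loop and then derives
-- the labels (run values) and the bound list by prefix sums of the run counts, instead of A's
-- per-index scan against the stored run start; same asymptotic cost (objective: alternative).
-- Pre_ excludes inputs containing an empty inner list, on which A raises IndexError (content[0]);
-- within Pre_ every index access below is in range, so getD is exact.

-- ===== PORT A =====
-- helper get_label_length_seq: loop over i in range(len(content)) with state (label_seq, length_seq, start)
def pvStepA (content : List Int) (st : List Int × List Int × Nat) (i : Nat) :
    List Int × List Int × Nat :=
  if content.getD i 0 ≠ content.getD st.2.2 0 then
    (st.1 ++ [content.getD st.2.2 0], st.2.1 ++ [Int.ofNat i], i)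
  else st

def pvSeqA (content : List Int) : List Int × List Int :=
  let res := (List.range content.length).foldl (pvStepA content) ([], [(0 : Int)], 0)
  (res.1 ++ [content.getD res.2.2 0], res.2.1 ++ [Int.ofNat content.length])

def get_label_bounds (data_labels : List (List Int)) : List (List Int) × List (List Int) :=
  data_labels.foldl
    (fun (acc : List (List Int) × List (List Int)) c =>
      let p := pvSeqA c
      (acc.1 ++ [p.1], acc.2 ++ [p.2]))
    ([], [])

-- ===== PORT B =====
-- inner while: advance j past the run of content[i] (two-pointer skip)
def pvRunEnd (content : List Int) (i j : Nat) : Nat :=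
  if h : j < content.length ∧ content.getD j 0 = content.getD i 0 then
    pvRunEnd content i (j + 1)
  else j
termination_by content.length - j
decreasing_by omega

-- cited by pvRLE's decreasing_by (termination of the outer while), hence stated here
theorem pvRunEnd_ge (content : List Int) (i j : Nat) : j ≤ pvRunEnd content i j := by
  fun_induction pvRunEnd content i j with
  | case1 j h ih => omega
  | case2 j h => exact le_rfl

-- outer while: run-length encoding (value, count) starting at index i
def pvRLE (content : List Int) (i : Nat) : List (Int × Nat) :=
  if h : i < content.length then
    let j := pvRunEnd content i (i + 1)
    (content.getD i 0, j - i) :: pvRLE content j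
  else []
termination_by content.length - i
decreasing_by
  have := pvRunEnd_ge content i (i + 1)
  omega

def pvSeqB (content : List Int) : List Int × List Int :=
  let runs := pvRLE content 0
  (runs.map Prod.fst,
   runs.foldl (fun (acc : List Int) rc => acc ++ [acc.getLastD 0 + Int.ofNat rc.2]) [(0 : Int)])

def get_label_bounds_alt (data_labels : List (List Int)) : List (List Int) × List (List Int) :=
  let pairs := data_labels.map pvSeqB
  (pairs.map Prod.fst, pairs.map Prod.snd)

-- ===== PRECONDITION & SPEC =====
-- Pre_ excludes inputs containing an empty inner sequence, on which A raises IndexError.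
def Pre_get_label_bounds (data_labels : List (List Int)) : Prop :=
  ∀ c ∈ data_labels, c ≠ []
instance (data_labels : List (List Int)) : Decidable (Pre_get_label_bounds data_labels) := by
  unfold Pre_get_label_bounds; infer_instance
def pvWitness_get_label_bounds : List (List Int) := [[1, 1, 2], [3], [2, 2]]

def Spec_get_label_bounds (data_labels : List (List Int)) (out : List (List Int) × List (List Int)) : Prop := out = get_label_bounds_alt data_labels
instance (data_labels : List (List Int)) (out : List (List Int) × List (List Int)) : Decidable (Spec_get_label_bounds data_labels out) := by unfold Spec_get_label_bounds; infer_instance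

-- ===== CLAIM (what is proved, stated in full; the proofs are below) =====
def Claim_equal_get_label_bounds : Prop := ∀ (data_labels : List (List Int)), Dom_get_label_bounds data_labels → Pre_get_label_bounds data_labels → Spec_get_label_bounds data_labels (get_label_bounds data_labels)

-- ===== LEMMAS AND PROOFS =====

-- adjacent-difference boundary indices strictly after s
def bAfter (content : List Int) (s : Nat) : List Nat :=
  (List.range' (s + 1) (content.length - (s + 1))).filter
    (fun j => content.getD j 0 ≠ content.getD (j - 1) 0)

-- the common normal form both ports are reduced to
def pvTable (content : List Int) : List Int × List Int :=
  ((0 :: bAfter content 0).map (fun j => content.getD j 0),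
   (0 : Int) :: ((bAfter content 0).map Int.ofNat ++ [Int.ofNat content.length]))

-- ---- A side (fold invariant over the boundary table) ----

def pvBds (content : List Int) (i : Nat) : List Nat :=
  (List.range' 1 (i - 1)).filter (fun j => content.getD j 0 ≠ content.getD (j - 1) 0)

def pvState (content : List Int) (i : Nat) : List Int × List Int × Nat :=
  (((0 :: pvBds content i).dropLast).map (fun j => content.getD j 0),
   (0 :: pvBds content i).map (fun j => Int.ofNat j),
   (pvBds content i).getLastD 0)

theorem pvBds_zero (content : List Int) : pvBds content 0 = [] := by
  simp [pvBds]

theorem pvBds_one (content : List Int) : pvBds content 1 = [] := by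
  simp [pvBds]

theorem pvBds_succ (content : List Int) (i : Nat) (hi : 1 ≤ i) :
    pvBds content (i + 1) =
      pvBds content i ++
        (if content.getD i 0 ≠ content.getD (i - 1) 0 then [i] else []) := by
  have h : i + 1 - 1 = (i - 1) + 1 := by omega
  rw [pvBds, h, List.range'_concat, List.filter_append]
  have h1 : 1 + 1 * (i - 1) = i := by omega
  rw [h1]
  refine congrArg₂ (· ++ ·) rfl ?_
  split_ifs with hc
  · simp only [List.getD] at hc
    simp [List.filter, hc]
  · simp only [List.getD] at hc
    simp [List.filter, hc]

theorem dropLast_map_concat_getLast {α β : Type} (f : α → β) (x : α) (l : List α) :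
    ((x :: l).dropLast).map f ++ [f ((x :: l).getLast (by simp))] = (x :: l).map f := by
  conv_rhs => rw [← List.dropLast_concat_getLast (l := x :: l) (by simp)]
  rw [List.map_append]
  simp

theorem getLast_cons_getLastD (x : Nat) (l : List Nat) :
    (x :: l).getLast (by simp) = l.getLastD x := by
  induction l generalizing x with
  | nil => simp
  | cons y t ih =>
    rw [List.getLastD_cons]
    exact (List.getLast_cons (by simp)).trans (ih y)

theorem pvInv (content : List Int) (i : Nat) (hi : i ≤ content.length) :
    (List.range i).foldl (pvStepA content) ([], [(0 : Int)], 0) = pvState content i ∧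
    (i = 0 ∨ content.getD (i - 1) 0 = content.getD ((pvBds content i).getLastD 0) 0) := by
  induction i with
  | zero => exact ⟨by simp [pvState, pvBds], Or.inl rfl⟩
  | succ i ih =>
    obtain ⟨hfold, hside⟩ := ih (by omega)
    rw [List.range_succ, List.foldl_append, List.foldl_cons, List.foldl_nil, hfold]
    by_cases hz : i = 0
    · subst hz
      constructor
      · simp [pvStepA, pvState, pvBds_zero, pvBds_one]
      · right; simp [pvBds_one]
    · have hi1 : 1 ≤ i := by omega
      have hprev : content.getD (i - 1) 0 = content.getD ((pvBds content i).getLastD 0) 0 := by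
        rcases hside with h | h
        · omega
        · exact h
      by_cases hb : content.getD i 0 ≠ content.getD (i - 1) 0
      · have hbds := pvBds_succ content i hi1
        rw [if_pos hb] at hbds
        refine ⟨?_, Or.inr ?_⟩
        · rw [pvStepA]
          rw [if_pos (by simp only [pvState]; rw [← hprev]; exact hb)]
          simp only [pvState, hbds]
          refine Prod.ext ?_ (Prod.ext ?_ ?_)
          · have h2 := dropLast_map_concat_getLast (fun j => content.getD j 0) 0
              (pvBds content i)
            rw [getLast_cons_getLastD] at h2
            show _ ++ _ = List.map _ (0 :: (pvBds content i ++ [i])).dropLast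
            rw [← List.cons_append, List.dropLast_concat]
            exact h2
          · simp
          · simp
        · rw [hbds]
          simp
      · rw [not_not] at hb
        have hbds := pvBds_succ content i hi1
        rw [if_neg (not_not_intro hb)] at hbds
        rw [List.append_nil] at hbds
        refine ⟨?_, Or.inr ?_⟩
        · rw [pvStepA]
          rw [if_neg (by simp only [pvState, not_not]; rw [← hprev]; exact hb)]
          simp only [pvState, hbds]
        · rw [hbds]
          simp only [Nat.add_sub_cancel]
          rw [hb]
          exact hprev

theorem pvBds_eq_bAfter (content : List Int) : pvBds content content.length = bAfter content 0 := rfl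

theorem pvSeqA_eq_table (content : List Int) : pvSeqA content = pvTable content := by
  obtain ⟨hfold, -⟩ := pvInv content content.length le_rfl
  have h2 := dropLast_map_concat_getLast (fun j => content.getD j 0) 0
    (pvBds content content.length)
  rw [getLast_cons_getLastD] at h2
  simp only [pvSeqA, hfold, pvState, pvTable, ← pvBds_eq_bAfter]
  refine Prod.ext ?_ ?_
  · exact h2.trans (by simp)
  · simp

-- ---- B side (run-length encoding against the boundary table) ----

theorem pvRunEnd_le (content : List Int) (i j : Nat) (hj : j ≤ content.length) :
    pvRunEnd content i j ≤ content.length := by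
  fun_induction pvRunEnd content i j with
  | case1 j h ih => exact ih (by omega)
  | case2 j h => exact hj

theorem pvRunEnd_run (content : List Int) (i j : Nat) :
    ∀ k, j ≤ k → k < pvRunEnd content i j → content.getD k 0 = content.getD i 0 := by
  fun_induction pvRunEnd content i j with
  | case1 j h ih =>
    intro k hk1 hk2
    by_cases hkj : k = j
    · subst hkj; exact h.2
    · exact ih k (by omega) hk2
  | case2 j h =>
    intro k hk1 hk2
    omega

theorem pvRunEnd_stop (content : List Int) (i j : Nat)
    (h : pvRunEnd content i j < content.length) :
    content.getD (pvRunEnd content i j) 0 ≠ content.getD i 0 := by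
  fun_induction pvRunEnd content i j with
  | case1 j hc ih => exact ih h
  | case2 j hc =>
    intro he
    exact hc ⟨h, he⟩

-- run property including the run start itself
theorem pvRun_all (content : List Int) (s : Nat) :
    ∀ k, s ≤ k → k < pvRunEnd content s (s + 1) →
      content.getD k 0 = content.getD s 0 := by
  intro k hk1 hk2
  by_cases hks : k = s
  · subst hks; rfl
  · exact pvRunEnd_run content s (s + 1) k (by omega) hk2

theorem pvRange'_split (a b n : Nat) (h1 : a ≤ b) (h2 : b ≤ n) :
    List.range' a (n - a) = List.range' a (b - a) ++ List.range' b (n - b) := by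
  have h : List.range' a (b - a) 1 ++ List.range' (a + 1 * (b - a)) (n - b) 1 =
      List.range' a ((b - a) + (n - b)) 1 := List.range'_append
  rw [show a + 1 * (b - a) = b from by omega] at h
  rw [show n - a = (b - a) + (n - b) from by omega]
  exact h.symm

theorem bAfter_split (content : List Int) (s : Nat) (hs : s < content.length) :
    bAfter content s =
      (if pvRunEnd content s (s + 1) = content.length then []
       else pvRunEnd content s (s + 1) :: bAfter content (pvRunEnd content s (s + 1))) := by
  set j := pvRunEnd content s (s + 1) with hj
  have hge : s + 1 ≤ j := pvRunEnd_ge content s (s + 1)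
  have hle : j ≤ content.length := pvRunEnd_le content s (s + 1) (by omega)
  have hsplit : List.range' (s + 1) (content.length - (s + 1)) =
      List.range' (s + 1) (j - (s + 1)) ++ List.range' j (content.length - j) :=
    pvRange'_split (s + 1) j content.length hge hle
  have hfirst : (List.range' (s + 1) (j - (s + 1))).filter
      (fun k => content.getD k 0 ≠ content.getD (k - 1) 0) = [] := by
    rw [List.filter_eq_nil_iff]
    intro k hk
    rw [List.mem_range'_1] at hk
    have h1 : content.getD k 0 = content.getD s 0 :=
      pvRun_all content s k (by omega) (by omega)
    have h2 : content.getD (k - 1) 0 = content.getD s 0 :=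
      pvRun_all content s (k - 1) (by omega) (by omega)
    simp only [List.getD] at h1 h2
    simp [h1, h2]
  rw [bAfter, hsplit, List.filter_append, hfirst, List.nil_append]
  by_cases hjn : j = content.length
  · rw [if_pos hjn]
    rw [hjn]
    simp
  · rw [if_neg hjn]
    have hjlt : j < content.length := by omega
    have hcons : List.range' j (content.length - j) =
        j :: List.range' (j + 1) (content.length - (j + 1)) := by
      have h : content.length - j = (content.length - (j + 1)) + 1 := by omega
      rw [h, List.range'_succ]
    rw [hcons]
    have hjpass : content.getD j 0 ≠ content.getD (j - 1) 0 := by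
      have h1 : content.getD (j - 1) 0 = content.getD s 0 :=
        pvRun_all content s (j - 1) (by omega) (by omega)
      rw [h1]
      exact pvRunEnd_stop content s (s + 1) hjlt
    rw [List.filter_cons]
    rw [if_pos (by simpa using hjpass)]
    rfl

theorem pvRLE_fst (content : List Int) (s : Nat) (hs : s < content.length) :
    (pvRLE content s).map Prod.fst =
      (s :: bAfter content s).map (fun k => content.getD k 0) := by
  fun_induction pvRLE content s with
  | case1 s h j ih =>
    rw [bAfter_split content s h]
    by_cases hjn : j = content.length
    · rw [if_pos hjn]
      have : pvRLE content j = [] := by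
        rw [pvRLE]
        rw [dif_neg (by omega)]
      simp [this]
    · rw [if_neg hjn]
      have hjlt : j < content.length := by
        have := pvRunEnd_le content s (s + 1) (by omega)
        omega
      simp only [List.map_cons]
      rw [ih hjlt]
      rfl
  | case2 s h => omega

theorem pvRLE_fold (content : List Int) (s : Nat) (hs : s < content.length) :
    ∀ acc : List Int, acc.getLastD 0 = Int.ofNat s →
      (pvRLE content s).foldl
          (fun (acc : List Int) rc => acc ++ [acc.getLastD 0 + Int.ofNat rc.2]) acc =
        acc ++ ((bAfter content s).map Int.ofNat ++ [Int.ofNat content.length]) := by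
  fun_induction pvRLE content s with
  | case1 s h j ih =>
    intro acc hacc
    have hge : s + 1 ≤ j := pvRunEnd_ge content s (s + 1)
    have hle : j ≤ content.length := pvRunEnd_le content s (s + 1) (by omega)
    rw [bAfter_split content s h]
    simp only [List.foldl_cons]
    have hstep : acc.getLastD 0 + Int.ofNat (j - s) = Int.ofNat j := by
      rw [hacc]
      simp only [Int.ofNat_eq_natCast]
      have := pvRunEnd_ge content s (s + 1)
      omega
    rw [hstep]
    by_cases hjn : j = content.length
    · rw [if_pos hjn]
      have : pvRLE content j = [] := by
        rw [pvRLE]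
        rw [dif_neg (by omega)]
      rw [this]
      simp [hjn]
    · rw [if_neg hjn]
      have hjlt : j < content.length := by omega
      rw [ih hjlt (acc ++ [Int.ofNat j]) (by simp)]
      simp only [List.map_cons, List.cons_append, List.append_assoc]
      rfl
  | case2 s h => omega

theorem pvSeqB_eq_table (content : List Int) (h : content ≠ []) :
    pvSeqB content = pvTable content := by
  have hn : 0 < content.length := List.length_pos_iff.mpr h
  refine Prod.ext ?_ ?_
  · show (pvRLE content 0).map Prod.fst = _
    rw [pvRLE_fst content 0 hn]
    rfl
  · show (pvRLE content 0).foldl _ [(0 : Int)] = _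
    rw [pvRLE_fold content 0 hn [(0 : Int)] (by simp)]
    simp [pvTable]

-- wrapper: A's dual-append foldl equals B's map-and-project
theorem pvWrap (xs : List (List Int)) (hpre : ∀ c ∈ xs, c ≠ []) (u v : List (List Int)) :
    xs.foldl
      (fun (acc : List (List Int) × List (List Int)) c =>
        (acc.1 ++ [(pvSeqA c).1], acc.2 ++ [(pvSeqA c).2]))
      (u, v) =
    (u ++ (xs.map pvSeqB).map Prod.fst, v ++ (xs.map pvSeqB).map Prod.snd) := by
  induction xs generalizing u v with
  | nil => simp
  | cons c t ih =>
    have hc : pvSeqA c = pvSeqB c :=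
      (pvSeqA_eq_table c).trans (pvSeqB_eq_table c (hpre c (by simp))).symm
    simp [List.foldl, ih (fun d hd => hpre d (by simp [hd])), hc]

-- ===== VERDICT (by name: the statement is the Claim_ definition above) =====
theorem get_label_bounds_spec : Claim_equal_get_label_bounds := by
  intro data_labels _ hpre
  show get_label_bounds data_labels = get_label_bounds_alt data_labels
  rw [get_label_bounds, get_label_bounds_alt, pvWrap data_labels hpre]
  simp
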